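-- pv_equiv track=rewrite | github.com/DENGARDEN/problem-solving-study | problems/programmers/Lv. 1/86491/src/solution.py | solution
-- ===== SOURCE A (Python) =====
-- def solution(sizes):
--     answer = 0
--
--     max_width = 0
--     max_height = 0
--
--     for size in sizes:
--         width, height = size
--         if width < height:
--             width, height = height, width
--         if width > max_width:
--             max_width = width
--         if height > max_height:
--             max_height = height
--
--     answer = max_width * max_height
--
--     return answer
-- ===== SOURCE B (Python) =====
-- def solution(sizes):
--     # Tournament (pairwise) reduction: normalize each card to (long, short),
--     # seed with (0, 0), then repeatedly merge adjacent pairs componentwise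
--     # until one envelope remains.
--     pairs = [(0, 0)] + [(max(w, h), min(w, h)) for w, h in sizes]
--     while len(pairs) > 1:
--         nxt = [(max(a[0], b[0]), max(a[1], b[1])) for a, b in zip(pairs[0::2], pairs[1::2])]
--         if len(pairs) % 2:
--             nxt.append(pairs[-1])
--         pairs = nxt
--     w, h = pairs[0]
--     return w * h
-- ===== Notes on version B (the rewrite author's own statement) =====
-- stated objective: alternative
-- what changed: Replaces A's single fused accumulator loop by a tournament reduction: normalize each card to a (long, short) pair, then repeatedly merge adjacent pairs componentwise (logarithmically many halving rounds) until one envelope remains.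
import Mathlib
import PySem

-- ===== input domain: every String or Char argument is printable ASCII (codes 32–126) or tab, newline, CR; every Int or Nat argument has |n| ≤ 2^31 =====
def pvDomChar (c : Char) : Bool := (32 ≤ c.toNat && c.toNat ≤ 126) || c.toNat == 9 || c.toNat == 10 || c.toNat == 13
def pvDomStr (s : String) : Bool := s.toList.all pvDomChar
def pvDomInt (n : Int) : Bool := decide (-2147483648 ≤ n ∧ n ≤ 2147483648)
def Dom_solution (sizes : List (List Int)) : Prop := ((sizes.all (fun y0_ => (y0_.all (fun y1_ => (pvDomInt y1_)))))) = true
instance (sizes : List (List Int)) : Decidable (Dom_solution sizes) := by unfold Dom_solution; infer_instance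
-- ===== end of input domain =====

-- B replaces A's single fused accumulator loop by a tournament (pairwise halving) reduction (alternative; same cost).

-- ===== PORT A =====
-- one loop step of A: unpack [width, height], swap so width ≥ height, update both accumulators
def solutionStep (st : Int × Int) (size : List Int) : Int × Int :=
  match size with
  | [w0, h0] =>
    let wh := if w0 < h0 then (h0, w0) else (w0, h0)
    ((if wh.1 > st.1 then wh.1 else st.1), (if wh.2 > st.2 then wh.2 else st.2))
  | _ => st   -- Python raises here (unpacking error); excluded by Pre_solution

def solution (sizes : List (List Int)) : Int :=
  let st := sizes.foldl solutionStep (0, 0)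
  st.1 * st.2

-- ===== PORT B =====
-- normalization of one card to (long side, short side); rows of other lengths raise in Python (excluded by Pre_solution)
def normPair (s : List Int) : Int × Int := match s with | [w, h] => (max w h, min w h) | _ => (0, 0)

-- componentwise max of two envelopes (one zip element of Source B's round)
def mergeEnv (a b : Int × Int) : Int × Int := (max a.1 b.1, max a.2 b.2)

-- one round of Source B's while loop: merge adjacent pairs (zip of evens with odds), keep a leftover last element
def tourneyRound : List (Int × Int) → List (Int × Int)
  | a :: b :: rest => mergeEnv a b :: tourneyRound rest
  | xs => xs

lemma tourneyRound_length (xs : List (Int × Int)) : (tourneyRound xs).length = (xs.length + 1) / 2 := by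
  induction xs using tourneyRound.induct with
  | case1 a b rest ih => simp [tourneyRound, ih]; omega
  | case2 xs h1 =>
    match xs, h1 with
    | [], _ => simp [tourneyRound]
    | [a], _ => simp [tourneyRound]
    | a :: b :: rest, h1 => exact absurd rfl (h1 a b rest)

-- Source B's while loop: reduce until a single envelope remains
def tourneyLoop (xs : List (Int × Int)) : Int × Int :=
  match xs with
  | [] => (0, 0)          -- unreachable: the loop is started on a nonempty list
  | [p] => p
  | a :: b :: rest => tourneyLoop (tourneyRound (a :: b :: rest))
termination_by xs.length
decreasing_by simp [tourneyRound, tourneyRound_length]; omega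

def solution_alt (sizes : List (List Int)) : Int :=
  let p := tourneyLoop ((0, 0) :: sizes.map normPair)
  p.1 * p.2

-- ===== PRECONDITION & SPEC =====
-- Pre_ excludes exactly the inputs on which A raises (unpacking 'width, height = size'
-- raises ValueError unless the row has exactly 2 elements).
def Pre_solution (sizes : List (List Int)) : Prop := ∀ s ∈ sizes, s.length = 2
instance (sizes : List (List Int)) : Decidable (Pre_solution sizes) := by unfold Pre_solution; infer_instance
def pvWitness_solution : List (List Int) := [[60, 50], [30, 70], [60, 30], [80, 40]]
def Spec_solution (sizes : List (List Int)) (out : Int) : Prop := out = solution_alt sizes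
instance (sizes : List (List Int)) (out : Int) : Decidable (Spec_solution sizes out) := by unfold Spec_solution; infer_instance

-- ===== CLAIM (what is proved, stated in full; the proofs are below) =====
def Claim_equal_solution : Prop := ∀ (sizes : List (List Int)), Dom_solution sizes → Pre_solution sizes → Spec_solution sizes (solution sizes)

-- ===== LEMMAS AND PROOFS =====
lemma mergeEnv_assoc (a b c : Int × Int) : mergeEnv (mergeEnv a b) c = mergeEnv a (mergeEnv b c) := by
  simp [mergeEnv, max_assoc]

lemma foldl_tourneyRound (xs : List (Int × Int)) : ∀ a, (tourneyRound xs).foldl mergeEnv a = xs.foldl mergeEnv a := by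
  induction xs using tourneyRound.induct with
  | case1 x y rest ih =>
    intro a
    simp only [tourneyRound, List.foldl_cons, ih, mergeEnv_assoc]
  | case2 xs h1 =>
    match xs, h1 with
    | [], _ => intro a; rfl
    | [x], _ => intro a; rfl
    | x :: y :: rest, h1 => exact absurd rfl (h1 x y rest)

lemma tourneyLoop_eq (xs : List (Int × Int)) :
    ∀ c l, xs = c :: l → tourneyLoop xs = l.foldl mergeEnv c := by
  induction xs using tourneyLoop.induct with
  | case1 => intro c l h; exact absurd h (by simp)
  | case2 p => intro c l h; cases h; simp [tourneyLoop]
  | case3 a b rest ih =>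
    intro c l h
    cases h
    rw [tourneyLoop]
    rw [ih (mergeEnv a b) (tourneyRound rest) (by simp [tourneyRound])]
    rw [foldl_tourneyRound]
    rfl

lemma solutionStep_eq (st : Int × Int) (s : List Int) (hs : s.length = 2) :
    solutionStep st s = mergeEnv st (normPair s) := by
  match s, hs with
  | [w, h], _ =>
    simp only [solutionStep, normPair, mergeEnv]
    split_ifs <;> simp [Prod.ext_iff] <;> omega

lemma foldl_steps (sizes : List (List Int)) (h : ∀ s ∈ sizes, s.length = 2) :
    ∀ st, sizes.foldl solutionStep st = (sizes.map normPair).foldl mergeEnv st := by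
  induction sizes with
  | nil => intro st; rfl
  | cons s rest ih =>
    intro st
    simp only [List.foldl_cons, List.map_cons]
    rw [solutionStep_eq st s (h s (by simp)), ih (fun t ht => h t (by simp [ht]))]

-- ===== VERDICT (by name: the statement is the Claim_ definition above) =====
theorem solution_spec : Claim_equal_solution := by
  intro sizes _ hpre
  unfold Spec_solution solution solution_alt
  rw [tourneyLoop_eq _ (0,0) (sizes.map normPair) rfl, foldl_steps sizes hpre]
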